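-- pv_equiv track=rewrite | github.com/bboxlin/algorithm | record/problems/minimum_number_of_food_buckets_to_feed_the_hamsters/solution.py | minimumBuckets
-- ===== SOURCE A (Python) =====
-- def minimumBuckets(street: str) -> int:
--     # "HB.H"
--     streetList = list(street)
--     n = len(streetList)
--     cnt = 0
--     for i in range(n):
--         if streetList[i] == 'H':
--             if (i-1 >= 0 and streetList[i-1] == 'B'):
--                 continue
--             elif (i+1 < n and streetList[i+1] == '.'):
--                 streetList[i+1] = 'B'
--                 cnt += 1
--             elif (i-1 >= 0 and streetList[i-1] == '.'):
--                 streetList[i-1] = 'B'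
--                 cnt += 1
--             else:
--                 return -1
--     return cnt
-- ===== SOURCE B (Python) =====
-- def minimumBuckets(street: str) -> int:
--     # Consume-from-front scan (stack pop) tracking only the previous effective
--     # character; placing a bucket to the right consumes the '.' and records
--     # prev = 'B' instead of mutating a copied list.
--     todo = list(street)
--     todo.reverse()
--     cnt = 0
--     prev = ' '
--     while todo:
--         c = todo.pop()
--         if c == 'H':
--             if prev == 'B':
--                 prev = 'H'
--             elif todo and todo[-1] == '.':
--                 todo.pop()
--                 prev = 'B'
--                 cnt += 1
--             elif prev == '.':
--                 prev = 'H'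
--                 cnt += 1
--             else:
--                 return -1
--         else:
--             prev = c
--     return cnt
-- ===== Notes on version B (the rewrite author's own statement) =====
-- stated objective: simpler
-- what changed: Replaces A's index loop over a mutated copy of the string (marking placed buckets with 'B' via list assignment) by a consume-from-front stack scan that keeps only a counter and the previous effective character: placing a bucket to the right pops the '.' and records prev='B', so no list copy is ever written to and no index arithmetic is needed.
import Mathlib
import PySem

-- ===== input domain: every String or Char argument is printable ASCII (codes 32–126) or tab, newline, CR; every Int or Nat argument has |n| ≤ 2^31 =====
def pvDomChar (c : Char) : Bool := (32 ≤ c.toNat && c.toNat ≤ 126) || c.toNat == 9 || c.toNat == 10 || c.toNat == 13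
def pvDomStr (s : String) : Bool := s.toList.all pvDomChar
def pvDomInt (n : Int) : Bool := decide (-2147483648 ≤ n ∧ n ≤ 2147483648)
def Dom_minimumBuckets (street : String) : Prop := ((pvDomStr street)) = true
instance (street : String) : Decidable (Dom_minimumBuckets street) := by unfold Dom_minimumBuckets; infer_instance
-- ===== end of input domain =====

-- B replaces A's index loop over a mutated list copy by a consume-from-front scan
-- keeping only the previous effective character (simpler: no mutation, no indices).

-- ===== PORT A =====
-- A's for-loop over range(n) with early 'return -1', as a recursion on the index;
-- streetList is the mutated list state (streetList[i+1] = 'B' → l.set (i+1) 'B').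
def pvAGo (l : List Char) (n i : Nat) (cnt : Int) : Int :=
  if _h : i < n then
    if l.getD i ' ' == 'H' then
      if decide (1 ≤ i) && (l.getD (i-1) ' ' == 'B') then
        pvAGo l n (i+1) cnt
      else if decide (i+1 < n) && (l.getD (i+1) ' ' == '.') then
        pvAGo (l.set (i+1) 'B') n (i+1) (cnt+1)
      else if decide (1 ≤ i) && (l.getD (i-1) ' ' == '.') then
        pvAGo (l.set (i-1) 'B') n (i+1) (cnt+1)
      else
        -1
    else pvAGo l n (i+1) cnt
  else cnt
  termination_by n - i

def minimumBuckets (street : String) : Int :=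
  pvAGo street.toList street.toList.length 0 0

-- ===== PORT B =====
-- B's while-loop popping the reversed list (= consuming the char list from the
-- front), carrying prev and cnt; 'todo and todo[-1]==.' → non-empty check + headD.
def pvBGo (todo : List Char) (prev : Char) (cnt : Int) : Int :=
  match todo with
  | [] => cnt
  | c :: rest =>
    if c == 'H' then
      if prev == 'B' then pvBGo rest 'H' cnt
      else if (!rest.isEmpty) && (rest.headD ' ' == '.') then
        pvBGo rest.tail 'B' (cnt + 1)
      else if prev == '.' then pvBGo rest 'H' (cnt + 1)
      else -1
    else pvBGo rest c cnt
  termination_by todo.length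
  decreasing_by all_goals (simp [List.length_tail]; try omega)

def minimumBuckets_alt (street : String) : Int :=
  pvBGo street.toList ' ' 0

-- ===== PRECONDITION & SPEC =====
def Spec_minimumBuckets (street : String) (out : Int) : Prop := out = minimumBuckets_alt street
instance (street : String) (out : Int) : Decidable (Spec_minimumBuckets street out) := by unfold Spec_minimumBuckets; infer_instance

-- ===== CLAIM (what is proved, stated in full; the proofs are below) =====
def Claim_equal_minimumBuckets : Prop := ∀ (street : String), Dom_minimumBuckets street → Spec_minimumBuckets street (minimumBuckets street)

-- ===== LEMMAS AND PROOFS =====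

theorem pvGetD_set_ne (l : List Char) (k j : Nat) (a d : Char) (h : k ≠ j) :
    (l.set k a).getD j d = l.getD j d := by
  simp [List.getD_eq_getElem?_getD, List.getElem?_set_ne h]

theorem pvGetD_set_self (l : List Char) (k : Nat) (a d : Char) (h : k < l.length) :
    (l.set k a).getD k d = a := by
  simp [List.getD_eq_getElem?_getD, h]

theorem pvHeadD_drop (s : List Char) (k : Nat) :
    (s.drop k).headD ' ' = s.getD k ' ' := by
  simp [List.head?_eq_getElem?, List.getElem?_drop,
    List.getD_eq_getElem?_getD]

theorem pvDrop_cons (s : List Char) (i : Nat) (hi : i < s.length) :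
    s.drop i = s.getD i ' ' :: s.drop (i+1) := by
  rw [List.drop_eq_getElem_cons hi, List.getD_eq_getElem s ' ' hi]

-- Invariant: A's mutated list l agrees with the original s from position i on,
-- and B's carried character prev compares to 'B' / '.' exactly as l[i-1] does
-- (false when i = 0).  Then the two loops coincide; in A's right-placement
-- branch two steps of A (place at i+1, then skip the placed 'B') equal B's
-- single step consuming the '.' with prev := 'B'.
theorem pvGo_eq (s : List Char) (i : Nat) (cnt : Int) (l : List Char) (prev : Char)
    (hl : l.length = s.length)
    (hagree : ∀ j, i ≤ j → l.getD j ' ' = s.getD j ' ')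
    (hB : (prev == 'B') = (decide (1 ≤ i) && (l.getD (i-1) ' ' == 'B')))
    (hD : (prev == '.') = (decide (1 ≤ i) && (l.getD (i-1) ' ' == '.'))) :
    pvAGo l s.length i cnt = pvBGo (s.drop i) prev cnt := by
  by_cases hi : i < s.length
  · rw [pvAGo, dif_pos hi, pvDrop_cons s i hi, pvBGo]
    have hci : l.getD i ' ' = s.getD i ' ' := hagree i (Nat.le_refl i)
    rw [hci]
    by_cases hH : (s.getD i ' ' == 'H') = true
    · rw [if_pos hH, if_pos hH]
      have hsH : s.getD i ' ' = 'H' := by simpa using hH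
      by_cases hfed : (decide (1 ≤ i) && (l.getD (i-1) ' ' == 'B')) = true
      · rw [if_pos hfed, if_pos (hB.trans hfed)]
        refine pvGo_eq s (i+1) cnt l 'H' hl (fun j hj => hagree j (by omega)) ?_ ?_
        · rw [show i + 1 - 1 = i from rfl, hagree i (Nat.le_refl i), hsH]; simp
        · rw [show i + 1 - 1 = i from rfl, hagree i (Nat.le_refl i), hsH]; simp
      · rw [if_neg hfed, if_neg (show ¬((prev == 'B') = true) by rw [hB]; exact hfed)]
        have hRcond : (decide (i+1 < s.length) && (l.getD (i+1) ' ' == '.'))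
            = ((!(s.drop (i+1)).isEmpty) && ((s.drop (i+1)).headD ' ' == '.')) := by
          rw [pvHeadD_drop, hagree (i+1) (by omega)]
          by_cases h1 : i + 1 < s.length
          · simp [h1, List.drop_eq_nil_iff, Nat.not_le.mpr h1]
          · simp [h1, List.drop_eq_nil_of_le (by omega : s.length ≤ i + 1)]
        by_cases hR : (decide (i+1 < s.length) && (l.getD (i+1) ' ' == '.')) = true
        · rw [if_pos hR, if_pos (hRcond ▸ hR)]
          have hi1 : i + 1 < s.length := by
            have := (Bool.and_eq_true _ _).mp hR
            exact of_decide_eq_true this.1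
          -- unroll A one step: the freshly placed 'B' at i+1 is not 'H'
          rw [pvAGo, dif_pos hi1, pvGetD_set_self l (i+1) 'B' ' ' (by omega),
            if_neg (show ¬ (('B' : Char) == 'H') = true by decide)]
          rw [List.tail_drop]
          refine pvGo_eq s (i+2) (cnt+1) (l.set (i+1) 'B') 'B' (by simp [hl]) ?_ ?_ ?_
          · intro j hj
            rw [pvGetD_set_ne l (i+1) j 'B' ' ' (by omega)]
            exact hagree j (by omega)
          · rw [show i + 2 - 1 = i + 1 from rfl,
              pvGetD_set_self l (i+1) 'B' ' ' (by omega)]; simp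
          · rw [show i + 2 - 1 = i + 1 from rfl,
              pvGetD_set_self l (i+1) 'B' ' ' (by omega)]; simp
        · rw [if_neg hR, if_neg (show ¬(((!(s.drop (i+1)).isEmpty) && ((s.drop (i+1)).headD ' ' == '.')) = true) by rw [← hRcond]; exact hR)]
          by_cases hL : (decide (1 ≤ i) && (l.getD (i-1) ' ' == '.')) = true
          · rw [if_pos hL, if_pos (hD.trans hL)]
            have h1i : 1 ≤ i := by
              have := (Bool.and_eq_true _ _).mp hL
              exact of_decide_eq_true this.1
            refine pvGo_eq s (i+1) (cnt+1) (l.set (i-1) 'B') 'H' (by simp [hl]) ?_ ?_ ?_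
            · intro j hj
              rw [pvGetD_set_ne l (i-1) j 'B' ' ' (by omega)]
              exact hagree j (by omega)
            · rw [show i + 1 - 1 = i from rfl,
                pvGetD_set_ne l (i-1) i 'B' ' ' (by omega), hagree i (Nat.le_refl i), hsH]
              simp
            · rw [show i + 1 - 1 = i from rfl,
                pvGetD_set_ne l (i-1) i 'B' ' ' (by omega), hagree i (Nat.le_refl i), hsH]
              simp
          · rw [if_neg hL, if_neg (show ¬((prev == '.') = true) by rw [hD]; exact hL)]
    · rw [if_neg hH, if_neg hH]
      refine pvGo_eq s (i+1) cnt l (s.getD i ' ') hl (fun j hj => hagree j (by omega)) ?_ ?_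
      · rw [show i + 1 - 1 = i from rfl, hagree i (Nat.le_refl i)]; simp
      · rw [show i + 1 - 1 = i from rfl, hagree i (Nat.le_refl i)]; simp
  · rw [pvAGo, dif_neg hi, List.drop_eq_nil_of_le (by omega : s.length ≤ i), pvBGo]
  termination_by s.length - i
  decreasing_by all_goals omega

-- ===== VERDICT (by name: the statement is the Claim_ definition above) =====
theorem minimumBuckets_spec : Claim_equal_minimumBuckets := by
  intro street _
  unfold Spec_minimumBuckets minimumBuckets minimumBuckets_alt
  have h := pvGo_eq street.toList 0 0 street.toList ' ' rfl (fun j _ => rfl)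
    (by simp) (by simp)
  simpa using h
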